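-- pv_equiv track=rewrite | github.com/swapnil-tf/service-example | .venv/lib/python3.11/site-packages/servicefoundry/python_deploy_generator.py | add_local_source_comment
-- ===== SOURCE A (Python) =====
-- COMMENT_FOR_LOCAL_SOURCE = """# Set build_source=LocalSource(local_build=False), in order to deploy code from your local.
-- # With local_build=False flag, docker image will be built on cloud instead of local
-- # Else it will try to use docker installed on your local machine to build the image"""
--
-- def add_local_source_comment(code):
--     lines = code.split("\n")
--     new_lines = []
--     for line in lines:
--         if line.lstrip(" ").startswith("build_source=GitSource"):
--             new_lines.append(COMMENT_FOR_LOCAL_SOURCE)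
--         new_lines.append(line)
--     return "\n".join(new_lines)
-- ===== SOURCE B (Python) =====
-- COMMENT_FOR_LOCAL_SOURCE = """# Set build_source=LocalSource(local_build=False), in order to deploy code from your local.
-- # With local_build=False flag, docker image will be built on cloud instead of local
-- # Else it will try to use docker installed on your local machine to build the image"""
--
-- MARKER = "build_source=GitSource"
--
--
-- def add_local_source_comment(code):
--     # Different algorithm: instead of scanning every line, search for substring
--     # occurrences of the marker; an occurrence whose characters back to its line
--     # start are all spaces marks that line start as an insertion offset.  Then
--     # splice the comment into the string at the collected offsets.
--     cuts = []
--     p = code.find(MARKER)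
--     while p != -1:
--         start = code.rfind("\n", 0, p) + 1
--         if code[start:p] == " " * (p - start):
--             cuts.append(start)
--         p = code.find(MARKER, p + 1)
--     parts = []
--     prev = 0
--     for c in cuts:
--         parts.append(code[prev:c])
--         parts.append(COMMENT_FOR_LOCAL_SOURCE + "\n")
--         prev = c
--     parts.append(code[prev:])
--     return "".join(parts)
-- ===== Notes on version B (the rewrite author's own statement) =====
-- stated objective: alternative
-- what changed: Replaces the line-by-line scan (split on newlines, lstrip+startswith each line, rebuild with join) by a substring search: collect all occurrences of the marker, keep those preceded only by spaces back to their line start, and splice the comment into the original string at those offsets.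
import Mathlib
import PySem

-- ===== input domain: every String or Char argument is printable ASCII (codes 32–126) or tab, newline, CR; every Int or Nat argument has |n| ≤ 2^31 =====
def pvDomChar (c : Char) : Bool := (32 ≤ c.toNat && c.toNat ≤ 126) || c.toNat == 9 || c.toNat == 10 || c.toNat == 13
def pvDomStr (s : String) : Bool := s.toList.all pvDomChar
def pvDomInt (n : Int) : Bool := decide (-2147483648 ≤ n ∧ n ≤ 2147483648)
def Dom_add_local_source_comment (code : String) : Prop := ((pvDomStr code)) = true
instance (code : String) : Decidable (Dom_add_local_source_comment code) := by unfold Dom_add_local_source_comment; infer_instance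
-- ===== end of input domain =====

-- B replaces A's per-line scan by a substring search: it collects the marker's
-- occurrences, keeps those preceded only by spaces back to their line start, and
-- splices the comment into the string at those offsets (alternative algorithm).

-- COMMENT_FOR_LOCAL_SOURCE, as a list of code points
def pvComment : List Char :=
  ("# Set build_source=LocalSource(local_build=False), in order to deploy code from your local.\n# With local_build=False flag, docker image will be built on cloud instead of local\n# Else it will try to use docker installed on your local machine to build the image").toList

-- the marker "build_source=GitSource"
def pvTrigger : List Char := ("build_source=GitSource").toList

-- ===== PORT A =====
-- line.lstrip(" ") is ported by hand as dropWhile (· == ' ') — exact for the chars=" " form.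
def add_local_source_comment (code : String) : String :=
  String.ofList (PySem.Chars.join ['\n']
    ((PySem.Chars.splitOn code.toList ['\n']).foldl (fun acc line =>
      (if PySem.Chars.startswith (line.dropWhile (· == ' ')) pvTrigger then acc ++ [pvComment] else acc)
        ++ [line]) []))

-- ===== PORT B =====
-- the `p = code.find(MARKER); while p != -1: … p = code.find(MARKER, p+1)` loop:
-- ascending list of all offsets where the marker occurs (find = isPrefixOf at the
-- offset; p+1 restart gives every occurrence) — exact.
def pvFindFrom (cs : List Char) (i : Nat) : List Nat :=
  if _h : i < cs.length then
    (if pvTrigger.isPrefixOf (cs.drop i) then [i] else []) ++ pvFindFrom cs (i + 1)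
  else []
  termination_by cs.length - i

-- `code.rfind("\n", 0, p) + 1`: index just after the last newline before p (0 if none) — exact.
def pvLineStart (cs : List Char) (p : Nat) : Nat :=
  p - ((cs.take p).reverse.takeWhile (· != '\n')).length

-- the body of the while loop: `start = …; if code[start:p] == " "*(p-start): cuts.append(start)`
-- (the slice has length p-start, so the comparison is 'all spaces') — exact.
def pvCuts (cs : List Char) : List Nat :=
  (pvFindFrom cs 0).filterMap (fun p =>
    let s := pvLineStart cs p
    if ((cs.take p).drop s).all (· == ' ') then some s else none)

-- the splice loop: parts.append(code[prev:c]); parts.append(COMMENT+"\n"); prev = c; … code[prev:]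
def pvSplice (cs : List Char) (prev : Nat) : List Nat → List Char
  | [] => cs.drop prev
  | c :: rest => (cs.take c).drop prev ++ pvComment ++ '\n' :: pvSplice cs c rest

def add_local_source_comment_alt (code : String) : String :=
  String.ofList (pvSplice code.toList 0 (pvCuts code.toList))

-- ===== PRECONDITION & SPEC =====
def Spec_add_local_source_comment (code : String) (out : String) : Prop := out = add_local_source_comment_alt code
instance (code : String) (out : String) : Decidable (Spec_add_local_source_comment code out) := by unfold Spec_add_local_source_comment; infer_instance

-- ===== CLAIM (what is proved, stated in full; the proofs are below) =====
def Claim_equal_add_local_source_comment : Prop := ∀ (code : String), Dom_add_local_source_comment code → Spec_add_local_source_comment code (add_local_source_comment code)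

-- ===== LEMMAS AND PROOFS =====

-- proof-only model of splitOn ['\n']: `pre` is the part of the current chunk read so far
def mySplit (pre : List Char) : List Char → List (List Char)
  | [] => [pre]
  | c :: rest => if c = '\n' then pre :: mySplit [] rest else mySplit (pre ++ [c]) rest

-- A's per-line condition
def pvCond (line : List Char) : Bool :=
  PySem.Chars.startswith (line.dropWhile (· == ' ')) pvTrigger

-- A's per-line block
def pvG (line : List Char) : List (List Char) :=
  (if pvCond line then [pvComment] else []) ++ [line]

-- splitOn.go with enough fuel is mySplit (modulo the accumulators)
lemma go_eq : ∀ (fuel : Nat) (l cur : List Char) (acc : List (List Char)),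
    l.length < fuel →
    PySem.Chars.splitOn.go ['\n'] fuel l cur acc = acc.reverse ++ mySplit cur.reverse l := by
  intro fuel
  induction fuel with
  | zero => intro l cur acc h; omega
  | succ f ih =>
    intro l cur acc h
    cases l with
    | nil => simp [PySem.Chars.splitOn.go, mySplit]
    | cons c rest =>
      rw [PySem.Chars.splitOn.go]
      by_cases hc : c = '\n'
      · subst hc
        have hp : ['\n'].isPrefixOf ('\n' :: rest) = true := by simp [List.isPrefixOf]
        rw [if_pos hp]
        have hlt : rest.length < f := by simpa using Nat.lt_of_succ_lt_succ h
        simp only [List.length_cons, List.length_nil, List.drop_succ_cons, List.drop_zero]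
        rw [ih _ _ _ hlt]
        simp [mySplit]
      · have hp : ¬ (['\n'].isPrefixOf (c :: rest) = true) := by
          simp [List.isPrefixOf]
          exact fun hh => (hc hh.symm).elim
        rw [if_neg hp]
        have hlt : rest.length < f := by simpa using Nat.lt_of_succ_lt_succ h
        rw [ih _ _ _ hlt]
        simp [mySplit, hc]

lemma splitOn_eq (cs : List Char) :
    PySem.Chars.splitOn cs ['\n'] = mySplit [] cs := by
  rw [PySem.Chars.splitOn, go_eq _ _ _ _ (by omega)]; rfl

-- A's foldl over lines is a flatMap of per-line blocks
lemma foldl_g (lines : List (List Char)) (acc : List (List Char)) :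
    lines.foldl (fun acc line =>
      (if PySem.Chars.startswith (line.dropWhile (· == ' ')) pvTrigger then acc ++ [pvComment] else acc)
        ++ [line]) acc
    = acc ++ lines.flatMap pvG := by
  induction lines generalizing acc with
  | nil => simp
  | cons l t ih =>
    simp only [List.foldl_cons, List.flatMap_cons, ih]
    by_cases hc : pvCond l <;> simp [pvG, pvCond] at hc ⊢ <;> simp [hc]

lemma mySplit_ne_nil (l pre : List Char) : mySplit pre l ≠ [] := by
  induction l generalizing pre with
  | nil => simp [mySplit]
  | cons c t ih => by_cases hc : c = '\n' <;> simp [mySplit, hc, ih]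

lemma mySplit_no_nl (l : List Char) (pre : List Char) (h : ∀ c ∈ l, c ≠ '\n') :
    mySplit pre l = [pre ++ l] := by
  induction l generalizing pre with
  | nil => simp [mySplit]
  | cons c t ih =>
    have hc : ¬ c = '\n' := h c (by simp)
    simp [mySplit, hc, ih _ (fun d hd => h d (by simp [hd]))]

lemma mySplit_append (line : List Char) (tail pre : List Char) (h : ∀ c ∈ line, c ≠ '\n') :
    mySplit pre (line ++ '\n' :: tail) = (pre ++ line) :: mySplit [] tail := by
  induction line generalizing pre with
  | nil => simp [mySplit]
  | cons c t ih =>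
    have hc : ¬ c = '\n' := h c (by simp)
    simp [mySplit, hc, ih _ (fun d hd => h d (by simp [hd]))]

lemma join_single (x : List Char) : PySem.Chars.join ['\n'] [x] = x := by
  simp [PySem.Chars.join, List.intercalate]

lemma join_cons (x y : List Char) (t : List (List Char)) :
    PySem.Chars.join ['\n'] (x :: y :: t) = x ++ '\n' :: PySem.Chars.join ['\n'] (y :: t) := by
  simp [PySem.Chars.join, List.intercalate]

-- a marker without '\n' matches before a '\n' iff it matches within the line
lemma prefix_stop (t : List Char) (hnl : ∀ c ∈ t, c ≠ '\n') :
    ∀ (ld tl : List Char), t.isPrefixOf (ld ++ '\n' :: tl) = t.isPrefixOf ld := by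
  induction t with
  | nil => intro ld tl; simp
  | cons c ct ih =>
    intro ld tl
    cases ld with
    | nil =>
      have hc : (c == '\n') = false := beq_eq_false_iff_ne.mpr (hnl c (by simp))
      simp [List.isPrefixOf, hc]
    | cons d dt =>
      simp only [List.cons_append, List.isPrefixOf]
      rw [ih (fun x hx => hnl x (by simp [hx]))]

lemma trigger_no_nl : ∀ c ∈ pvTrigger, c ≠ '\n' := by
  have hall : pvTrigger.all (fun c => c != '\n') = true := rfl
  simpa using List.all_eq_true.mp hall

-- ----- B-side helper lemmas -----

lemma take_append_big (l m : List Char) (n : Nat) : (l ++ m).take (l.length + n) = l ++ m.take n := by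
  rw [List.take_append]; simp

lemma drop_append_big (l m : List Char) (n : Nat) : (l ++ m).drop (l.length + n) = m.drop n := by
  rw [List.drop_append]; simp

lemma takeWhile_append_stop (p : Char → Bool) (a : Char) (ha : p a = false) (m : List Char) :
    ∀ l : List Char, (l ++ a :: m).takeWhile p = l.takeWhile p := by
  intro l
  induction l with
  | nil => simp [List.takeWhile, ha]
  | cons c t ih => by_cases hc : p c <;> simp [List.takeWhile_cons, hc, ih]

lemma dropWhile_eq_drop (p : Char → Bool) : ∀ l : List Char, l.dropWhile p = l.drop ((l.takeWhile p).length) := by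
  intro l
  induction l with
  | nil => rfl
  | cons c t ih => by_cases hc : p c <;> simp [List.takeWhile_cons, List.dropWhile_cons, hc, ih]

lemma take_all_iff (p : Char → Bool) : ∀ (l : List Char) (n : Nat), n ≤ l.length →
    ((l.take n).all p = true ↔ n ≤ (l.takeWhile p).length) := by
  intro l
  induction l with
  | nil =>
    intro n hn
    have hn0 : n = 0 := by simpa using hn
    subst hn0
    simp
  | cons c t ih =>
    intro n hn
    cases n with
    | zero => simp
    | succ m =>
      by_cases hc : p c
      · rw [List.take_succ_cons, List.all_cons, hc, Bool.true_and,
          List.takeWhile_cons, if_pos hc, List.length_cons]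
        rw [ih m (by simpa using hn)]
        omega
      · simp [List.takeWhile_cons, hc]

lemma drop_takeWhile_head (p : Char → Bool) : ∀ (l : List Char) (n : Nat),
    n < (l.takeWhile p).length → ∃ c t, l.drop n = c :: t ∧ p c = true := by
  intro l
  induction l with
  | nil => intro n hn; simp at hn
  | cons c t ih =>
    intro n hn
    by_cases hc : p c
    · cases n with
      | zero => exact ⟨c, t, rfl, hc⟩
      | succ m =>
        simp only [List.takeWhile_cons, if_pos hc, List.length_cons] at hn
        exact ih m (by omega)
    · simp [List.takeWhile_cons, hc] at hn

lemma trigger_nil : pvTrigger.isPrefixOf ([] : List Char) = false := rfl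

lemma takeWhile_len_le (p : Char → Bool) : ∀ l : List Char, (l.takeWhile p).length ≤ l.length := by
  intro l
  induction l with
  | nil => simp
  | cons c t ih => by_cases hc : p c <;> simp [List.takeWhile_cons, hc] <;> omega

lemma filterMap_congr_mem {α β : Type} (l : List α) (f g : α → Option β)
    (h : ∀ x ∈ l, f x = g x) : l.filterMap f = l.filterMap g := by
  induction l with
  | nil => rfl
  | cons a t ih =>
    rw [List.filterMap_cons, List.filterMap_cons, h a (by simp), ih (fun x hx => h x (by simp [hx]))]

lemma filterMap_option_map {α : Type} (g : Nat → Nat) (f : α → Option Nat) (l : List α) :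
    l.filterMap (fun x => (f x).map g) = (l.filterMap f).map g := by
  induction l with
  | nil => rfl
  | cons a t ih => cases hf : f a <;> simp [List.filterMap_cons, hf, ih]

-- every position produced by pvFindFrom is in range and ≥ the start index
lemma findFrom_mem (cs : List Char) : ∀ n i, cs.length - i ≤ n →
    ∀ p ∈ pvFindFrom cs i, i ≤ p ∧ p < cs.length := by
  intro n
  induction n with
  | zero =>
    intro i hle p hp
    rw [pvFindFrom, dif_neg (by omega)] at hp
    simp at hp
  | succ m ih =>
    intro i hle p hp
    by_cases hi : i < cs.length
    · rw [pvFindFrom, dif_pos hi] at hp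
      rcases List.mem_append.mp hp with h1 | h2
      · have : p = i := by split at h1 <;> simp at h1; omega
        omega
      · have := ih (i + 1) (by omega) p h2
        omega
    · rw [pvFindFrom, dif_neg hi] at hp
      simp at hp

-- splitting the occurrence scan at the first newline
lemma findFrom_shift (line tail : List Char) :
    ∀ n j, tail.length - j ≤ n →
    pvFindFrom (line ++ '\n' :: tail) (line.length + 1 + j)
      = (pvFindFrom tail j).map (· + (line.length + 1)) := by
  intro n
  induction n with
  | zero =>
    intro j hle
    have hj : ¬ j < tail.length := by omega
    have hj' : ¬ line.length + 1 + j < (line ++ '\n' :: tail).length := by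
      simp only [List.length_append, List.length_cons]; omega
    rw [pvFindFrom, dif_neg hj', pvFindFrom, dif_neg hj]
    rfl
  | succ m ih =>
    intro j hle
    by_cases hj : j < tail.length
    · have hj' : line.length + 1 + j < (line ++ '\n' :: tail).length := by
        simp only [List.length_append, List.length_cons]; omega
      have hdrop : (line ++ '\n' :: tail).drop (line.length + 1 + j) = tail.drop j := by
        have : line ++ '\n' :: tail = (line ++ ['\n']) ++ tail := by simp
        rw [this]
        have hlen : line.length + 1 + j = (line ++ ['\n']).length + j := by simp
        rw [hlen, drop_append_big]
      have hR : pvFindFrom tail j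
          = (if pvTrigger.isPrefixOf (tail.drop j) then [j] else []) ++ pvFindFrom tail (j + 1) := by
        conv_lhs => rw [pvFindFrom]
        rw [dif_pos hj]
      conv_lhs => rw [pvFindFrom]
      rw [dif_pos hj', hdrop, hR]
      have hstep : line.length + 1 + j + 1 = line.length + 1 + (j + 1) := by omega
      rw [hstep, ih (j + 1) (by omega)]
      by_cases hpre : pvTrigger.isPrefixOf (tail.drop j)
      · simp only [if_pos hpre, List.map_append, List.map_cons, List.map_nil,
          List.cons_append, List.nil_append]
        congr 1
        omega
      · simp [hpre]
    · have hj' : ¬ line.length + 1 + j < (line ++ '\n' :: tail).length := by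
        simp only [List.length_append, List.length_cons]; omega
      rw [pvFindFrom, dif_neg hj', pvFindFrom, dif_neg hj]
      rfl

lemma findFrom_decomp_end (line tail : List Char) :
    pvFindFrom (line ++ '\n' :: tail) line.length
      = (pvFindFrom tail 0).map (· + (line.length + 1)) := by
  have hlt : line.length < (line ++ '\n' :: tail).length := by
    simp only [List.length_append, List.length_cons]; omega
  have hdrop : (line ++ '\n' :: tail).drop line.length = '\n' :: tail := by
    simpa using drop_append_big line ('\n' :: tail) 0
  have hpre : pvTrigger.isPrefixOf ('\n' :: tail) = false := by
    have hb : pvTrigger = 'b' :: pvTrigger.tail := rfl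
    rw [hb]
    simp [List.isPrefixOf]
  conv_lhs => rw [pvFindFrom]
  rw [dif_pos hlt, hdrop, hpre]
  have := findFrom_shift line tail tail.length 0 (by omega)
  simpa using this

lemma findFrom_decomp (line tail : List Char) :
    ∀ n i, line.length - i ≤ n → i ≤ line.length →
    pvFindFrom (line ++ '\n' :: tail) i
      = pvFindFrom line i ++ (pvFindFrom tail 0).map (· + (line.length + 1)) := by
  intro n
  induction n with
  | zero =>
    intro i hle hi
    have hieq : i = line.length := by omega
    subst hieq
    have h0 : pvFindFrom line line.length = [] := by
      rw [pvFindFrom]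
      rw [dif_neg (by omega)]
    rw [findFrom_decomp_end, h0, List.nil_append]
  | succ m ih =>
    intro i hle hi
    by_cases hil : i < line.length
    · have hlt : i < (line ++ '\n' :: tail).length := by
        simp only [List.length_append, List.length_cons]; omega
      have hdrop : (line ++ '\n' :: tail).drop i = line.drop i ++ '\n' :: tail :=
        List.drop_append_of_le_length (by omega)
      have hR : pvFindFrom line i
          = (if pvTrigger.isPrefixOf (line.drop i) then [i] else []) ++ pvFindFrom line (i + 1) := by
        conv_lhs => rw [pvFindFrom]
        rw [dif_pos hil]
      conv_lhs => rw [pvFindFrom]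
      rw [dif_pos hlt, hdrop, prefix_stop pvTrigger trigger_no_nl, hR,
        ih (i + 1) (by omega) (by omega), List.append_assoc]
    · have hieq : i = line.length := by omega
      subst hieq
      have h0 : pvFindFrom line line.length = [] := by
        rw [pvFindFrom]
        rw [dif_neg (by omega)]
      rw [findFrom_decomp_end, h0, List.nil_append]

-- pvCond in terms of take/drop at the leading-space boundary
lemma cond_eq (line : List Char) :
    pvCond line = pvTrigger.isPrefixOf (line.drop ((line.takeWhile (· == ' ')).length)) := by
  show pvTrigger.isPrefixOf (line.dropWhile (· == ' ')) = _
  rw [dropWhile_eq_drop]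

-- a qualifying occurrence sits exactly at the end of the leading spaces
lemma qual_unique (line : List Char) (p : Nat) (hp : p < line.length)
    (hall : (line.take p).all (· == ' ') = true)
    (hpre : pvTrigger.isPrefixOf (line.drop p) = true) :
    p = (line.takeWhile (· == ' ')).length ∧ pvCond line = true := by
  have hle : p ≤ (line.takeWhile (· == ' ')).length :=
    (take_all_iff _ line p (by omega)).mp hall
  have hpq : ¬ p < (line.takeWhile (· == ' ')).length := by
    intro hlt
    obtain ⟨c, t, hdrop, hc⟩ := drop_takeWhile_head _ line p hlt
    have hcs : c = ' ' := by simpa using hc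
    subst hcs
    rw [hdrop] at hpre
    have hb : pvTrigger = 'b' :: pvTrigger.tail := rfl
    rw [hb] at hpre
    simp [List.isPrefixOf] at hpre
  have hpq' : p = (line.takeWhile (· == ' ')).length := by omega
  refine ⟨hpq', ?_⟩
  rw [cond_eq, ← hpq']
  exact hpre

lemma cond_q_lt (line : List Char) (hc : pvCond line = true) :
    (line.takeWhile (· == ' ')).length < line.length := by
  rw [cond_eq] at hc
  by_contra hge
  have hlen : (line.takeWhile (· == ' ')).length ≤ line.length := takeWhile_len_le _ line
  have : (line.takeWhile (· == ' ')).length = line.length := by omega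
  rw [this, List.drop_length, trigger_nil] at hc
  exact Bool.false_ne_true hc

-- the per-line first-cut characterization
lemma lineQual (line : List Char) :
    ∀ n i, line.length - i ≤ n →
    (pvFindFrom line i).filterMap (fun p =>
        if ((line.take p).all (· == ' ')) then some 0 else none)
      = if i ≤ (line.takeWhile (· == ' ')).length ∧ pvCond line = true then [0] else [] := by
  intro n
  induction n with
  | zero =>
    intro i hle
    rw [pvFindFrom, dif_neg (by omega)]
    rw [List.filterMap_nil]
    split
    · next hcond =>
      have := cond_q_lt line hcond.2
      omega
    · rfl
  | succ m ih =>
    intro i hle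
    by_cases hil : i < line.length
    · rw [pvFindFrom, dif_pos hil, List.filterMap_append]
      by_cases hpre : pvTrigger.isPrefixOf (line.drop i)
      · rw [if_pos hpre]
        by_cases hall : (line.take i).all (· == ' ')
        · obtain ⟨hiq, hcond⟩ := qual_unique line i hil hall hpre
          have hrest := ih (i + 1) (by omega)
          rw [hrest, if_neg (by omega)]
          have hone : List.filterMap (fun p =>
              if ((line.take p).all (· == ' ')) then some 0 else none) [i] = [0] := by
            rw [List.filterMap_cons, List.filterMap_nil]
            rw [if_pos hall]
          rw [hone, if_pos ⟨by omega, hcond⟩, List.append_nil]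
        · have hiq : ¬ i ≤ (line.takeWhile (· == ' ')).length := by
            intro hle'
            exact hall ((take_all_iff _ line i (by omega)).mpr hle')
          have hone : List.filterMap (fun p =>
              if ((line.take p).all (· == ' ')) then some 0 else none) [i] = [] := by
            rw [List.filterMap_cons, List.filterMap_nil]
            rw [if_neg hall]
          rw [ih (i + 1) (by omega), if_neg (by omega), if_neg (by intro hh; exact hiq hh.1), hone,
            List.append_nil]
      · rw [if_neg hpre, List.filterMap_nil, List.nil_append, ih (i + 1) (by omega)]
        by_cases hcond : pvCond line = true
        · by_cases hiq : i ≤ (line.takeWhile (· == ' ')).length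
          · by_cases hiq1 : i + 1 ≤ (line.takeWhile (· == ' ')).length
            · rw [if_pos ⟨hiq1, hcond⟩, if_pos ⟨hiq, hcond⟩]
            · -- i = q, but cond says trigger matches at q: contradiction with hpre
              have hieq : i = (line.takeWhile (· == ' ')).length := by omega
              rw [cond_eq, ← hieq] at hcond
              exact absurd hcond hpre
          · rw [if_neg (by omega), if_neg (by intro hh; exact hiq hh.1)]
        · rw [if_neg (by intro hh; exact hcond hh.2), if_neg (by intro hh; exact hcond hh.2)]
    · rw [pvFindFrom, dif_neg hil, List.filterMap_nil]
      split
      · next hcond =>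
        have := cond_q_lt line hcond.2
        omega
      · rfl

-- line start of a position inside a newline-free prefix is 0
lemma lineStart_no_nl (cs : List Char) (p : Nat) (hp : p ≤ cs.length)
    (hnl : ∀ c ∈ cs.take p, c ≠ '\n') : pvLineStart cs p = 0 := by
  unfold pvLineStart
  have hall : ((cs.take p).reverse.takeWhile (· != '\n')) = (cs.take p).reverse := by
    rw [List.takeWhile_eq_self_iff]
    intro a ha
    have := hnl a (List.mem_reverse.mp ha)
    simpa using this
  rw [hall]
  simp
  omega

-- pvCuts of a newline-free string
lemma cuts_no_nl (cs : List Char) (hnl : ∀ c ∈ cs, c ≠ '\n') :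
    pvCuts cs = if pvCond cs then [0] else [] := by
  unfold pvCuts
  rw [filterMap_congr_mem _ _ (fun p => if ((cs.take p).all (· == ' ')) then some 0 else none)
    (by
      intro p hp
      obtain ⟨-, hpl⟩ := findFrom_mem cs cs.length 0 (by omega) p hp
      have hls : pvLineStart cs p = 0 :=
        lineStart_no_nl cs p (by omega) (fun c hc => hnl c (List.mem_of_mem_take hc))
      simp only [hls, List.drop_zero])]
  rw [lineQual cs cs.length 0 (by omega)]
  by_cases hc : pvCond cs = true
  · rw [if_pos ⟨by omega, hc⟩, if_pos hc]
  · rw [if_neg (by intro hh; exact hc hh.2), if_neg hc]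

-- pvCuts decomposition at the first newline
lemma cuts_decomp (line tail : List Char) (hnl : ∀ c ∈ line, c ≠ '\n') :
    pvCuts (line ++ '\n' :: tail)
      = (if pvCond line then [0] else []) ++ (pvCuts tail).map (· + (line.length + 1)) := by
  unfold pvCuts
  rw [findFrom_decomp line tail line.length 0 (by omega) (by omega), List.filterMap_append]
  congr 1
  · rw [filterMap_congr_mem _ _ (fun p => if ((line.take p).all (· == ' ')) then some 0 else none)
      (by
        intro p hp
        obtain ⟨-, hpl⟩ := findFrom_mem line line.length 0 (by omega) p hp
        have htake : (line ++ '\n' :: tail).take p = line.take p :=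
          List.take_append_of_le_length (by omega)
        have hls : pvLineStart (line ++ '\n' :: tail) p = 0 := by
          unfold pvLineStart
          rw [htake]
          have hall : ((line.take p).reverse.takeWhile (· != '\n')) = (line.take p).reverse := by
            rw [List.takeWhile_eq_self_iff]
            intro a ha
            have := hnl a (List.mem_of_mem_take (List.mem_reverse.mp ha))
            simpa using this
          rw [hall]
          simp
          omega
        simp only [hls, htake, List.drop_zero])]
    rw [lineQual line line.length 0 (by omega)]
    by_cases hc : pvCond line = true
    · rw [if_pos ⟨by omega, hc⟩, if_pos hc]
    · rw [if_neg (by intro hh; exact hc hh.2), if_neg hc]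
  · rw [List.filterMap_map]
    rw [filterMap_congr_mem _ _
      (fun p => ((fun p => let s := pvLineStart tail p;
          if ((tail.take p).drop s).all (· == ' ') then some s else none) p).map (· + (line.length + 1)))
      (by
        intro p hp
        obtain ⟨-, hpl⟩ := findFrom_mem tail tail.length 0 (by omega) p hp
        have hcomm : p + (line.length + 1) = (line ++ ['\n']).length + p := by simp; omega
        have htake : (line ++ '\n' :: tail).take (p + (line.length + 1))
            = (line ++ ['\n']) ++ tail.take p := by
          have hsplit : line ++ '\n' :: tail = (line ++ ['\n']) ++ tail := by simp
          rw [hsplit, hcomm, take_append_big]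
        have hrev : ((line ++ ['\n']) ++ tail.take p).reverse
            = (tail.take p).reverse ++ '\n' :: line.reverse := by simp
        have htw : (((line ++ ['\n']) ++ tail.take p).reverse.takeWhile (· != '\n'))
            = ((tail.take p).reverse.takeWhile (· != '\n')) := by
          rw [hrev, takeWhile_append_stop _ '\n' (by simp) _ _]
        have hklen : ((tail.take p).reverse.takeWhile (· != '\n')).length ≤ p := by
          have h1 := takeWhile_len_le (· != '\n') (tail.take p).reverse
          simp at h1
          omega
        have hls : pvLineStart (line ++ '\n' :: tail) (p + (line.length + 1))
            = pvLineStart tail p + (line.length + 1) := by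
          unfold pvLineStart
          rw [htake, htw]
          omega
        have hseg : ((line ++ '\n' :: tail).take (p + (line.length + 1))).drop
              (pvLineStart tail p + (line.length + 1))
            = (tail.take p).drop (pvLineStart tail p) := by
          rw [htake]
          have hc2 : pvLineStart tail p + (line.length + 1) = (line ++ ['\n']).length + pvLineStart tail p := by
            simp; omega
          rw [hc2, drop_append_big]
        show (if (((line ++ '\n' :: tail).take (p + (line.length + 1))).drop
              (pvLineStart (line ++ '\n' :: tail) (p + (line.length + 1)))).all (· == ' ')
            then some (pvLineStart (line ++ '\n' :: tail) (p + (line.length + 1))) else none)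
          = Option.map (· + (line.length + 1))
            (if ((tail.take p).drop (pvLineStart tail p)).all (· == ' ')
             then some (pvLineStart tail p) else none)
        rw [hls, hseg]
        by_cases hsp : ((tail.take p).drop (pvLineStart tail p)).all (· == ' ')
        · rw [if_pos hsp, if_pos hsp]
          rfl
        · rw [if_neg hsp, if_neg hsp]
          rfl)]
    rw [filterMap_option_map]

-- splicing with shifted cuts
lemma splice_shift (line tail : List Char) : ∀ (cuts : List Nat) (prev : Nat),
    pvSplice (line ++ '\n' :: tail) (prev + (line.length + 1)) (cuts.map (· + (line.length + 1)))
      = pvSplice tail prev cuts := by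
  intro cuts
  induction cuts with
  | nil =>
    intro prev
    show (line ++ '\n' :: tail).drop (prev + (line.length + 1)) = tail.drop prev
    have hsplit : line ++ '\n' :: tail = (line ++ ['\n']) ++ tail := by simp
    have hc : prev + (line.length + 1) = (line ++ ['\n']).length + prev := by simp; omega
    rw [hsplit, hc, drop_append_big]
  | cons c rest ih =>
    intro prev
    show ((line ++ '\n' :: tail).take (c + (line.length + 1))).drop (prev + (line.length + 1))
        ++ pvComment ++ '\n' :: pvSplice (line ++ '\n' :: tail) (c + (line.length + 1)) (rest.map (· + (line.length + 1)))
      = (tail.take c).drop prev ++ pvComment ++ '\n' :: pvSplice tail c rest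
    have hsplit : line ++ '\n' :: tail = (line ++ ['\n']) ++ tail := by simp
    have hc1 : c + (line.length + 1) = (line ++ ['\n']).length + c := by simp; omega
    have hc2 : prev + (line.length + 1) = (line ++ ['\n']).length + prev := by simp; omega
    rw [ih c]
    congr 1
    rw [hsplit, hc1, take_append_big, hc2, drop_append_big]

lemma splice_top (line tail : List Char) (cuts : List Nat) :
    pvSplice (line ++ '\n' :: tail) 0 (cuts.map (· + (line.length + 1)))
      = line ++ '\n' :: pvSplice tail 0 cuts := by
  cases cuts with
  | nil => simp [pvSplice]
  | cons c rest =>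
    show ((line ++ '\n' :: tail).take (c + (line.length + 1))).drop 0
        ++ pvComment ++ '\n' :: pvSplice (line ++ '\n' :: tail) (c + (line.length + 1)) (rest.map (· + (line.length + 1)))
      = line ++ '\n' :: pvSplice tail 0 (c :: rest)
    have hsplit : line ++ '\n' :: tail = (line ++ ['\n']) ++ tail := by simp
    have hc1 : c + (line.length + 1) = (line ++ ['\n']).length + c := by simp; omega
    have htake : (line ++ '\n' :: tail).take (c + (line.length + 1)) = line ++ '\n' :: tail.take c := by
      rw [hsplit, hc1, take_append_big]
      simp
    rw [List.drop_zero, htake, splice_shift line tail rest c]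
    show (line ++ '\n' :: tail.take c) ++ pvComment ++ '\n' :: pvSplice tail c rest
      = line ++ '\n' :: ((tail.take c).drop 0 ++ pvComment ++ '\n' :: pvSplice tail c rest)
    simp

lemma dropWhile_cons_decomp (cs : List Char) (c : Char) (tail : List Char)
    (h : cs.dropWhile (· != '\n') = c :: tail) :
    c = '\n' ∧ cs = cs.takeWhile (· != '\n') ++ '\n' :: tail
      ∧ ∀ d ∈ cs.takeWhile (· != '\n'), d ≠ '\n' := by
  induction cs with
  | nil => simp [List.dropWhile] at h
  | cons a t ih =>
    by_cases ha : a = '\n'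
    · subst ha
      simp [List.dropWhile, List.takeWhile] at h ⊢
      exact ⟨h.1.symm, h.2⟩
    · have ha' : (a != '\n') = true := by simp [ha]
      simp only [List.dropWhile_cons, ha'] at h
      obtain ⟨hc, heq, hnl⟩ := ih h
      refine ⟨hc, ?_, ?_⟩
      · simp only [List.takeWhile_cons, ha']
        simpa using congrArg (a :: ·) heq
      · intro d hd
        simp only [List.takeWhile_cons, ha'] at hd
        rcases List.mem_cons.mp hd with h1 | h2
        · subst h1; exact ha
        · exact hnl d h2

-- main bridge: B's splice equals the join of A's per-line blocks
set_option maxRecDepth 8000 in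
lemma splice_eq_aux : ∀ (n : Nat) (cs : List Char), cs.length ≤ n →
    pvSplice cs 0 (pvCuts cs) = PySem.Chars.join ['\n'] ((mySplit [] cs).flatMap pvG) := by
  intro n
  induction n with
  | zero =>
    intro cs hle
    have : cs = [] := List.length_eq_zero_iff.mp (by omega)
    subst this
    have h0 : pvCuts [] = [] := by
      unfold pvCuts
      rw [pvFindFrom]
      rw [dif_neg (by simp), List.filterMap_nil]
    rw [h0]
    have hc : pvCond [] = false := by
      rw [cond_eq]
      simp [trigger_nil]
    show ([] : List Char).drop 0 = _
    simp only [List.drop_nil, mySplit, List.flatMap_cons, List.flatMap_nil, pvG, hc,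
      Bool.false_eq_true, if_false, List.nil_append, List.append_nil]
    rw [join_single]
  | succ m ih =>
    intro cs hle
    cases h : cs.dropWhile (· != '\n') with
    | nil =>
      have hnl : ∀ c ∈ cs, c ≠ '\n' := by
        intro c hc
        have := (List.dropWhile_eq_nil_iff.mp h) c hc
        simpa using this
      rw [mySplit_no_nl cs [] hnl, cuts_no_nl cs hnl]
      simp only [List.nil_append, List.flatMap_cons, List.flatMap_nil, List.append_nil, pvG]
      by_cases hc : pvCond cs
      · rw [if_pos hc, if_pos hc]
        show (cs.take 0).drop 0 ++ pvComment ++ '\n' :: pvSplice cs 0 []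
          = PySem.Chars.join ['\n'] [pvComment, cs]
        rw [join_cons, join_single]
        simp [pvSplice]
      · rw [if_neg hc, if_neg hc]
        show cs.drop 0 = PySem.Chars.join ['\n'] [cs]
        rw [join_single]
        simp
    | cons c tail =>
      obtain ⟨hc, heq, hnl⟩ := dropWhile_cons_decomp cs c tail h
      subst hc
      set line := cs.takeWhile (· != '\n') with hline
      have hlen : tail.length < cs.length := by
        rw [heq]
        simp
        omega
      have ihp := ih tail (by omega)
      rw [heq, cuts_decomp line tail hnl, mySplit_append line tail [] hnl]
      simp only [List.nil_append, List.flatMap_cons]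
      obtain ⟨mm, ms, hm⟩ : ∃ mm ms, List.flatMap pvG (mySplit ([] : List Char) tail) = mm :: ms := by
        cases hmm : mySplit ([] : List Char) tail with
        | nil => exact absurd hmm (mySplit_ne_nil tail [])
        | cons a as =>
          rw [List.flatMap_cons]
          by_cases hca : pvCond a
          · exact ⟨pvComment, a :: as.flatMap pvG, by simp [pvG, hca]⟩
          · exact ⟨a, as.flatMap pvG, by simp [pvG, hca]⟩
      by_cases hcnd : pvCond line
      · have hpg : pvG line = [pvComment, line] := by
          unfold pvG
          rw [if_pos hcnd]
          rfl
        rw [if_pos hcnd, hpg, hm]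
        show ((line ++ '\n' :: tail).take 0).drop 0 ++ pvComment ++ '\n' ::
            pvSplice (line ++ '\n' :: tail) 0 ((pvCuts tail).map (· + (line.length + 1)))
          = PySem.Chars.join ['\n'] ([pvComment, line] ++ mm :: ms)
        rw [splice_top line tail (pvCuts tail), ihp, hm]
        show pvComment ++ '\n' :: (line ++ '\n' :: PySem.Chars.join ['\n'] (mm :: ms))
          = PySem.Chars.join ['\n'] (pvComment :: line :: mm :: ms)
        rw [join_cons, join_cons]
      · have hpg : pvG line = [line] := by
          unfold pvG
          rw [if_neg hcnd]
          rfl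
        rw [if_neg hcnd, hpg, hm]
        show pvSplice (line ++ '\n' :: tail) 0 ((pvCuts tail).map (· + (line.length + 1)))
          = PySem.Chars.join ['\n'] ([line] ++ mm :: ms)
        rw [splice_top line tail (pvCuts tail), ihp, hm]
        show line ++ '\n' :: PySem.Chars.join ['\n'] (mm :: ms)
          = PySem.Chars.join ['\n'] (line :: mm :: ms)
        rw [join_cons]

lemma splice_eq (cs : List Char) :
    pvSplice cs 0 (pvCuts cs) = PySem.Chars.join ['\n'] ((mySplit [] cs).flatMap pvG) :=
  splice_eq_aux cs.length cs (by omega)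

theorem add_local_source_comment_spec : Claim_equal_add_local_source_comment := by
  intro code _
  unfold Spec_add_local_source_comment add_local_source_comment add_local_source_comment_alt
  rw [splitOn_eq, foldl_g, splice_eq]
  simp
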